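-- pv_equiv track=rewrite | github.com/lorenzomonticelli/FMIndex | fm_index_script.py | occurrence_table
-- ===== SOURCE A (Python) =====
-- def occurrence_table(bwt):
--     """
--     The function builds an occurrence table for efficient rank queries in the BWT.
--     Args:
--         bwt (str) -> Burrows-Wheeler Transform of the sequence.
--     Returns:
--         dict -> Dictionary mapping each character to a list of cumulative counts across BWT.
--     """
--     tab = {}
--     for char in set(bwt):
--         tab[char] = []
--         count = 0
--         for sym in bwt:
--             if sym == char:
--                 count += 1
--             tab[char].append(count)
--     return tab
-- ===== SOURCE B (Python) =====
-- def occurrence_table(bwt):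
--     """
--     Build the occurrence table from the positions of each character:
--     one pass records where each character occurs, then each row is
--     assembled as runs of constant cumulative counts between occurrences.
--     """
--     positions = {}
--     for i, sym in enumerate(bwt):
--         positions.setdefault(sym, []).append(i)
--     n = len(bwt)
--     tab = {}
--     for char, pos in positions.items():
--         row = []
--         prev = 0
--         count = 0
--         for p in pos:
--             row += [count] * (p - prev)
--             prev = p
--             count += 1
--         row += [count] * (n - prev)
--         tab[char] = row
--     return tab
-- ===== Notes on version B (the rewrite author's own statement) =====
-- stated objective: alternative
-- what changed: Instead of one full scan of bwt per distinct character with a per-symbol comparison, B records each character's occurrence positions in a single pass and then builds each cumulative-count row as runs of constant counts between consecutive occurrences (list-repetition segments).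
import Mathlib
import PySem

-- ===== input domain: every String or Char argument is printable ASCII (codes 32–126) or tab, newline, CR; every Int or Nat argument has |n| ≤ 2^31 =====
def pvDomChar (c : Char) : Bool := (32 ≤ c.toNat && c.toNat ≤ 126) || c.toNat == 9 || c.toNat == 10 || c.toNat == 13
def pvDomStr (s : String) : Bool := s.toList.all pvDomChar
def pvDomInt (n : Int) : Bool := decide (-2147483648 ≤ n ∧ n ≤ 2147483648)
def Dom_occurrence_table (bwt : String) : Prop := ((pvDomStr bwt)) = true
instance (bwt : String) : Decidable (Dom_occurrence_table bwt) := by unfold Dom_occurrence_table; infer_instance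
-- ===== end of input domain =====

-- B builds each character's cumulative row from its occurrence positions (run-length
-- segments) instead of A's one full per-symbol scan of bwt for every distinct character.
-- (A's Python iterates set(bwt) in hash order; dict outputs are compared as dicts, so
-- both ports use first-occurrence key order.)

-- a 1-character Python string
def pvChr (c : Char) : String := String.ofList [c]

-- ===== PORT A =====
-- inner loop of A: count = 0; for sym in bwt: if sym == char: count += 1; row.append(count)
def pvRowA (l : List Char) (char : Char) : List Int :=
  (l.foldl (fun (st : Int × List Int) sym =>
      let count := if sym = char then st.1 + 1 else st.1
      (count, st.2 ++ [count])) (0, [])).2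

-- tab[char] = [] then appended per symbol: net effect is one insert of the finished row
def occurrence_table (bwt : String) : List (String × List Int) :=
  ((PySem.Set.ofList bwt.toList).foldl
      (fun tab char => tab.insert (pvChr char) (pvRowA bwt.toList char))
      (PySem.Dict.empty : PySem.Dict String (List Int))).items

-- ===== PORT B =====
-- for i, sym in enumerate(bwt): positions.setdefault(sym, []).append(i)
def pvPositions (l : List Char) : PySem.Dict String (List Int) :=
  (PySem.List.enumerate l 0).foldl
    (fun d p => d.modify (pvChr p.2) [] (fun v => v ++ [p.1])) PySem.Dict.empty

-- row = []; prev = 0; count = 0; for p in pos: row += [count]*(p-prev); prev = p; count += 1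
-- then row += [count]*(n-prev)
def pvRowB (n : Int) (pos : List Int) : List Int :=
  let st := pos.foldl
    (fun (st : List Int × Int × Int) p =>
      (st.1 ++ PySem.List.pyRepeat [st.2.2] (p - st.2.1), p, st.2.2 + 1))
    ([], 0, 0)
  st.1 ++ PySem.List.pyRepeat [st.2.2] (n - st.2.1)

def occurrence_table_alt (bwt : String) : List (String × List Int) :=
  let n : Int := PySem.Str.len bwt
  ((pvPositions bwt.toList).items.foldl
      (fun tab cp => tab.insert cp.1 (pvRowB n cp.2))
      (PySem.Dict.empty : PySem.Dict String (List Int))).items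

-- ===== PRECONDITION & SPEC =====
def Spec_occurrence_table (bwt : String) (out : List (String × List Int)) : Prop := out = occurrence_table_alt bwt
instance (bwt : String) (out : List (String × List Int)) : Decidable (Spec_occurrence_table bwt out) := by unfold Spec_occurrence_table; infer_instance

-- ===== CLAIM (what is proved, stated in full; the proofs are below) =====
def Claim_equal_occurrence_table : Prop := ∀ (bwt : String), Dom_occurrence_table bwt → Spec_occurrence_table bwt (occurrence_table bwt)

-- ===== LEMMAS AND PROOFS =====

theorem pvChr_inj {c d : Char} (h : pvChr c = pvChr d) : c = d := by
  have := congrArg String.toList h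
  simp only [pvChr, String.toList_ofList] at this
  exact List.singleton_injective this

theorem pvChr_beq (c d : Char) : (pvChr c == pvChr d) = (c == d) := by
  by_cases h : c = d
  · subst h; simp
  · have hne : pvChr c ≠ pvChr d := fun hc => h (pvChr_inj hc)
    simp [h, hne]

-- Set.ofList commutes with mapping the injective pvChr
theorem ofList_map_pvChr (l : List Char) :
    PySem.Set.ofList (l.map pvChr) = (PySem.Set.ofList l).map pvChr := by
  induction l using List.reverseRecOn with
  | nil => rfl
  | append_singleton t a ih =>
    rw [List.map_append, List.map_singleton,
        PySem.Set.ofList_append_singleton, PySem.Set.ofList_append_singleton,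
        ih, PySem.Set.add, PySem.Set.add]
    by_cases hmem : a ∈ t
    · have h1 : (PySem.Set.ofList t).contains a = true := by
        simp [PySem.Set.contains, PySem.Set.mem_ofList, hmem]
      have h2 : PySem.Set.contains ((PySem.Set.ofList t).map pvChr) (pvChr a) = true := by
        simp only [PySem.Set.contains, List.contains_eq_mem, List.mem_map,
          PySem.Set.mem_ofList, decide_eq_true_eq]
        exact ⟨a, hmem, rfl⟩
      rw [if_pos h2, if_pos h1]
    · have h1 : (PySem.Set.ofList t).contains a = false := by
        simp [PySem.Set.contains, PySem.Set.mem_ofList, hmem]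
      have h2 : PySem.Set.contains ((PySem.Set.ofList t).map pvChr) (pvChr a) = false := by
        simp only [PySem.Set.contains, List.contains_eq_mem, List.mem_map,
          PySem.Set.mem_ofList, decide_eq_false_iff_not, not_exists, not_and]
        intro b hb hchr
        exact absurd (pvChr_inj hchr ▸ hb) hmem
      rw [if_neg (by rw [h2]; simp), if_neg (by rw [h1]; simp), List.map_append,
        List.map_singleton]

-- first component of A's inner fold is the running count
theorem rowA_fst (l : List Char) (char : Char) (k : Int) (acc : List Int) :
    (l.foldl (fun (st : Int × List Int) sym =>
      let count := if sym = char then st.1 + 1 else st.1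
      (count, st.2 ++ [count])) (k, acc)).1 = k + (l.count char : Int) := by
  induction l generalizing k acc with
  | nil => simp
  | cons x t ih =>
    simp only [List.foldl_cons]
    rw [ih]
    by_cases h : x = char
    · subst h; simp; ring
    · simp [h]

theorem rowA_append (l : List Char) (a char : Char) :
    pvRowA (l ++ [a]) char
      = pvRowA l char ++ [(l.count char : Int) + if a = char then 1 else 0] := by
  unfold pvRowA
  rw [List.foldl_append]
  simp only [List.foldl_cons, List.foldl_nil]
  have hfst := rowA_fst l char 0 []
  by_cases h : a = char <;> simp [h, hfst]

-- occurrence indices of char in l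
def pvIdxs (l : List Char) (char : Char) : List Int :=
  ((PySem.List.enumerate l 0).filter (fun p => p.2 == char)).map (fun p => p.1)

theorem idxs_append (l : List Char) (a char : Char) :
    pvIdxs (l ++ [a]) char
      = pvIdxs l char ++ (if a = char then [(l.length : Int)] else []) := by
  unfold pvIdxs
  rw [PySem.List.enumerate_append]
  by_cases h : a = char <;>
    simp [PySem.List.enumerate_cons, PySem.List.enumerate_nil, List.filter_append, h]

-- proof-only name for B's run-building fold over the occurrence indices
def pvRun (l : List Char) (char : Char) : List Int × Int × Int :=
  (pvIdxs l char).foldl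
    (fun (st : List Int × Int × Int) p =>
      (st.1 ++ PySem.List.pyRepeat [st.2.2] (p - st.2.1), p, st.2.2 + 1))
    ([], 0, 0)

-- invariant of B's run fold: prev is a valid split point, count is the full count,
-- and the built segments followed by the trailing run reproduce A's row
theorem pvRun_spec (l : List Char) (char : Char) :
    0 ≤ (pvRun l char).2.1 ∧ (pvRun l char).2.1 ≤ (l.length : Int) ∧
    (pvRun l char).2.2 = (l.count char : Int) ∧
    (pvRun l char).1 ++
      List.replicate ((l.length : Int) - (pvRun l char).2.1).toNat (pvRun l char).2.2
      = pvRowA l char := by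
  induction l using List.reverseRecOn with
  | nil =>
    refine ⟨by simp [pvRun, pvIdxs, PySem.List.enumerate_nil],
      by simp [pvRun, pvIdxs, PySem.List.enumerate_nil],
      by simp [pvRun, pvIdxs, PySem.List.enumerate_nil], ?_⟩
    simp [pvRun, pvIdxs, pvRowA, PySem.List.enumerate_nil]
  | append_singleton t a ih =>
    obtain ⟨h0, hle, hcnt, hrow⟩ := ih
    have hstep : pvRun (t ++ [a]) char =
        ((pvIdxs t char ++ if a = char then [(t.length : Int)] else []).foldl
          (fun (st : List Int × Int × Int) p =>
            (st.1 ++ PySem.List.pyRepeat [st.2.2] (p - st.2.1), p, st.2.2 + 1))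
          ([], 0, 0)) := by
      rw [pvRun, idxs_append]
    by_cases h : a = char
    · rw [hstep, if_pos h, List.foldl_append]
      simp only [List.foldl_cons, List.foldl_nil]
      refine ⟨by positivity, ?_, ?_, ?_⟩
      · simp only [List.length_append, List.length_singleton]
        push_cast; omega
      · show (pvRun t char).2.2 + 1 = _
        rw [hcnt, List.count_append, List.count_singleton, h]
        push_cast; simp
      · show (pvRun t char).1 ++ PySem.List.pyRepeat [(pvRun t char).2.2]
            ((t.length : Int) - (pvRun t char).2.1) ++
            List.replicate ((((t ++ [a]).length : Int)) - (t.length : Int)).toNat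
              ((pvRun t char).2.2 + 1) = pvRowA (t ++ [a]) char
        rw [rowA_append, if_pos h, ← hrow, PySem.List.pyRepeat_singleton]
        have h1 : (((t ++ [a]).length : Int) - (t.length : Int)).toNat = 1 := by
          simp only [List.length_append, List.length_singleton]; omega
        rw [h1, List.append_assoc, List.append_assoc]
        congr 2
        simp [hcnt]
    · have hsame : pvRun (t ++ [a]) char = pvRun t char := by
        rw [hstep, if_neg h, List.append_nil, pvRun]
      refine ⟨hsame ▸ h0, ?_, ?_, ?_⟩
      · rw [hsame]; simp only [List.length_append, List.length_singleton]; push_cast; omega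
      · rw [hsame, hcnt, List.count_append, List.count_singleton]
        simp [h]
      · rw [hsame, rowA_append, if_neg h, add_zero, ← hrow]
        have h2 : (((t ++ [a]).length : Int) - (pvRun t char).2.1).toNat
            = ((t.length : Int) - (pvRun t char).2.1).toNat + 1 := by
          simp only [List.length_append, List.length_singleton]; omega
        rw [h2, List.replicate_succ', List.append_assoc, hcnt]

theorem rowB_eq_rowA (l : List Char) (char : Char) :
    pvRowB (l.length : Int) (pvIdxs l char) = pvRowA l char := by
  show (pvRun l char).1 ++ PySem.List.pyRepeat [(pvRun l char).2.2]
      ((l.length : Int) - (pvRun l char).2.1) = pvRowA l char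
  rw [PySem.List.pyRepeat_singleton]
  exact (pvRun_spec l char).2.2.2

theorem positions_getD (l : List Char) (char : Char) :
    (pvPositions l).getD (pvChr char) [] = pvIdxs l char := by
  unfold pvPositions
  rw [show (PySem.List.enumerate l 0).foldl
        (fun d p => d.modify (pvChr p.2) [] (fun v => v ++ [p.1])) PySem.Dict.empty
      = ((PySem.List.enumerate l 0).map (fun p => (pvChr p.2, p.1))).foldl
        (fun d p => d.modify p.1 [] (fun v => v ++ [p.2])) PySem.Dict.empty from
    by rw [List.foldl_map]]
  rw [PySem.Dict.getD_foldl_modify_append]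
  simp only [PySem.Dict.getD_empty, List.nil_append, List.filter_map, List.map_map, pvIdxs]
  congr 1
  · apply List.filter_congr
    intro p _
    simp [Function.comp, pvChr_beq]

theorem positions_keys (l : List Char) :
    (pvPositions l).keys = (PySem.Set.ofList l).map pvChr := by
  unfold pvPositions
  rw [PySem.Dict.keys_foldl_modify_key (PySem.List.enumerate l 0) (fun p => pvChr p.2) []
      (fun _ p v => v ++ [p.1]) PySem.Dict.empty]
  rw [PySem.Dict.keys_empty]
  have h1 : (PySem.List.enumerate l 0).map (fun p => pvChr p.2) = l.map pvChr := by
    rw [show (fun (p : Int × Char) => pvChr p.2) = pvChr ∘ Prod.snd from rfl,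
        ← List.map_map, PySem.List.map_snd_enumerate]
  rw [h1, show PySem.Set.update [] (l.map pvChr) = PySem.Set.ofList (l.map pvChr) from rfl,
      ofList_map_pvChr]

theorem positions_nodup (l : List Char) : (pvPositions l).keys.Nodup := by
  rw [positions_keys]
  exact (PySem.Set.nodup_ofList l).map (fun _ _ h => pvChr_inj h)

theorem positions_items (l : List Char) :
    (pvPositions l).items = (PySem.Set.ofList l).map (fun c => (pvChr c, pvIdxs l c)) := by
  rw [PySem.Dict.items_eq_map_keys _ (positions_nodup l) [], positions_keys, List.map_map]
  refine List.map_congr_left (fun c _ => ?_)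
  simp only [Function.comp_apply]
  rw [positions_getD]

theorem tableA_eq (bwt : String) :
    occurrence_table bwt
      = (PySem.Set.ofList bwt.toList).map (fun c => (pvChr c, pvRowA bwt.toList c)) := by
  unfold occurrence_table
  rw [PySem.Dict.items_foldl_insert_fresh _ pvChr _ _
      (fun a _ => PySem.Dict.contains_empty _)
      ((PySem.Set.nodup_ofList bwt.toList).map (fun _ _ h => pvChr_inj h))]
  simp [show (PySem.Dict.empty : PySem.Dict String (List Int)).items = [] from rfl]

theorem tableB_eq (bwt : String) :
    occurrence_table_alt bwt
      = (PySem.Set.ofList bwt.toList).map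
          (fun c => (pvChr c, pvRowB (PySem.Str.len bwt) (pvIdxs bwt.toList c))) := by
  unfold occurrence_table_alt
  have hnodup : ((pvPositions bwt.toList).items.map Prod.fst).Nodup := positions_nodup bwt.toList
  rw [PySem.Dict.items_foldl_insert_fresh _ Prod.fst
      (fun cp => pvRowB (PySem.Str.len bwt) cp.2)
      _ (fun a _ => PySem.Dict.contains_empty _) hnodup]
  simp only [positions_items, List.map_map]
  simp [show (PySem.Dict.empty : PySem.Dict String (List Int)).items = [] from rfl]

-- ===== VERDICT (by name: the statement is the Claim_ definition above) =====
theorem occurrence_table_spec : Claim_equal_occurrence_table := by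
  intro bwt _
  unfold Spec_occurrence_table
  rw [tableA_eq, tableB_eq]
  refine List.map_congr_left (fun c _ => ?_)
  rw [PySem.Str.len_eq, rowB_eq_rowA]
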